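-- pv_equiv track=rewrite | github.com/LeeBingswan/Biomimetic-Visual-Agent | GM.py | get_new_messages
-- ===== SOURCE A (Python) =====
-- def get_new_messages(old_list, new_list):
--     """Compare old and new bubble lists, extract only truly new messages, completely isolate history"""
--     if not old_list:
--         return new_list
--
--     if old_list[-1] == new_list[-1]:  # If the text of the last bubble is exactly the same, it means the screen just shook slightly, no new message
--         return []
--
--     max_overlap = 0  # Find the maximum overlap between old and new lists (e.g., Old: [A, B], New: [B, C] -> Overlap is [B], New is [C])
--     for i in range(1, min(len(old_list), len(new_list)) + 1):
--         if old_list[-i:] == new_list[:i]: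
--             max_overlap = i
--
--     return new_list[max_overlap:]  # Only return the new content after the overlap part
-- ===== SOURCE B (Python) =====
-- def get_new_messages(old_list, new_list):
--     """Compare old and new bubble lists, extract only truly new messages, completely isolate history"""
--     if not old_list:
--         return new_list
--     if old_list[-1] == new_list[-1]:
--         return []
--     n = len(old_list)
--     # Candidate alignment positions p (overlap length n-p); filter them by one
--     # left-to-right pass over new_list, element by element -- no list slicing.
--     cand = list(range(max(0, n - len(new_list)), n))
--     for j, x in enumerate(new_list):
--         cand = [p for p in cand if p + j >= n or old_list[p + j] == x]
--         if not cand: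
--             break
--     if not cand:
--         return new_list
--     return new_list[n - cand[0]:]
-- ===== Notes on version B (the rewrite author's own statement) =====
-- stated objective: faster
-- what changed: Instead of A's loop over all overlap lengths comparing a pair of list slices for each, B keeps a set of candidate alignment positions and prunes it element-by-element in one left-to-right pass over new_list (no slicing), exiting as soon as no candidate survives; the surviving smallest position gives the maximal overlap.
import Mathlib
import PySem

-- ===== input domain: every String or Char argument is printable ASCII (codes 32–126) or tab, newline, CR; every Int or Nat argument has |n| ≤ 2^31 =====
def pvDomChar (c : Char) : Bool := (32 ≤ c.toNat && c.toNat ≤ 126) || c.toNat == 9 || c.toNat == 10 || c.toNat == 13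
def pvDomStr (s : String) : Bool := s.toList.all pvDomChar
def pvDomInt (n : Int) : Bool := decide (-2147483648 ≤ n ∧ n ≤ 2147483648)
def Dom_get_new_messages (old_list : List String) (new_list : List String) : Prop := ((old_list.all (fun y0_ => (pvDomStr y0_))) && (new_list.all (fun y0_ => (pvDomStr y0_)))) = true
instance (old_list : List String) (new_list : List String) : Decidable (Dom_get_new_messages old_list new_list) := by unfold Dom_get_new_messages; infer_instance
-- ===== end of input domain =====

-- B replaces A's loop over overlap lengths with slice comparisons by a single
-- element-by-element pass over new_list that prunes a set of candidate alignment
-- positions with early exit (measured faster); return values proved equal on Pre_.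

-- ===== PORT A =====
def get_new_messages (old_list : List String) (new_list : List String) : List String :=
  if old_list = [] then new_list
  else if PySem.List.pyGet? old_list (-1) = PySem.List.pyGet? new_list (-1) then []
  else
    let m : Int := min (old_list.length : Int) (new_list.length : Int)
    let max_overlap : Int :=
      (PySem.List.pyRange 1 (m + 1) 1).foldl
        (fun acc i =>
          if PySem.List.slice old_list (some (-i)) none = PySem.List.slice new_list none (some i)
          then i else acc) 0
    PySem.List.slice new_list (some max_overlap) none

-- ===== PORT B =====
-- 'for j, x in enumerate(new_list): cand = [p for p in cand if ...]; if not cand: break'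
def gnmLoop (old_list : List String) (n : Int) : List (Int × String) → List Int → List Int
  | [], cand => cand
  | (j, x) :: rest, cand =>
      let cand' := cand.filter
        (fun p => decide (p + j ≥ n) || decide (PySem.List.pyGetD old_list (p + j) "" = x))
      if cand' = [] then cand' else gnmLoop old_list n rest cand'

def get_new_messages_alt (old_list : List String) (new_list : List String) : List String :=
  if old_list = [] then new_list
  else if PySem.List.pyGet? old_list (-1) = PySem.List.pyGet? new_list (-1) then []
  else
    let n : Int := (old_list.length : Int)
    let cand := PySem.List.pyRange (max 0 (n - (new_list.length : Int))) n 1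
    match gnmLoop old_list n (PySem.List.enumerate new_list) cand with
    | [] => new_list
    | p :: _ => PySem.List.slice new_list (some (n - p)) none

-- ===== PRECONDITION & SPEC =====
-- Pre_ excludes exactly the inputs where A raises IndexError (old_list non-empty, new_list empty).
def Pre_get_new_messages (old_list : List String) (new_list : List String) : Prop :=
  old_list = [] ∨ new_list ≠ []
instance (old_list : List String) (new_list : List String) : Decidable (Pre_get_new_messages old_list new_list) := by unfold Pre_get_new_messages; infer_instance

def pvWitness_get_new_messages : List String × List String := (["a", "b"], ["b", "c"])

def Spec_get_new_messages (old_list : List String) (new_list : List String) (out : List String) : Prop := out = get_new_messages_alt old_list new_list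
instance (old_list : List String) (new_list : List String) (out : List String) : Decidable (Spec_get_new_messages old_list new_list out) := by unfold Spec_get_new_messages; infer_instance

-- ===== CLAIM (what is proved, stated in full; the proofs are below) =====
def Claim_equal_get_new_messages : Prop := ∀ (old_list : List String) (new_list : List String), Dom_get_new_messages old_list new_list → Pre_get_new_messages old_list new_list → Spec_get_new_messages old_list new_list (get_new_messages old_list new_list)

-- ===== LEMMAS AND PROOFS =====
-- A's max-recording fold = first match of reversed list
theorem gnm_foldlA_eq (o nl : List String) :
    ∀ (L : List Int) (d : Int),
      L.foldl (fun acc i =>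
          if PySem.List.slice o (some (-i)) none = PySem.List.slice nl none (some i)
          then i else acc) d
        = ((L.reverse.find? (fun i =>
            decide (PySem.List.slice o (some (-i)) none
              = PySem.List.slice nl none (some i)))).getD d) := by
  intro L
  induction L with
  | nil => intro d; simp
  | cons x L ih =>
      intro d
      simp only [List.foldl_cons, List.reverse_cons, List.find?_append]
      rw [ih]
      cases h : L.reverse.find? (fun i =>
          decide (PySem.List.slice o (some (-i)) none
            = PySem.List.slice nl none (some i))) with
      | some y => simp
      | none =>
          simp only [Option.none_or]
          by_cases hx : PySem.List.slice o (some (-x)) none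
              = PySem.List.slice nl none (some x) <;> simp [hx]

theorem gnm_find?_congr {α : Type} (p q : α → Bool) :
    ∀ (l : List α), (∀ x ∈ l, p x = q x) → l.find? p = l.find? q := by
  intro l
  induction l with
  | nil => intro _; rfl
  | cons x l ih =>
      intro h
      simp only [List.find?_cons]
      rw [h x (by simp)]
      cases q x
      · exact ih (fun y hy => h y (by simp [hy]))
      · rfl

theorem gnm_find?_eq_head?_filter {α : Type} (p : α → Bool) :
    ∀ (l : List α), l.find? p = (l.filter p).head? := by
  intro l
  induction l with
  | nil => rfl
  | cons x l ih =>
      rw [List.find?_cons, List.filter_cons]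
      cases h : p x
      · simpa using ih
      · simp

-- B's early-exit filtering pass = one filter by the conjunction of all step predicates
theorem gnmLoop_eq_filter (o : List String) (n : Int) :
    ∀ (L : List (Int × String)) (cand : List Int),
      gnmLoop o n L cand
        = cand.filter (fun p => L.all (fun jx =>
            decide (p + jx.1 ≥ n) || decide (PySem.List.pyGetD o (p + jx.1) "" = jx.2))) := by
  intro L
  induction L with
  | nil => intro cand; simp [gnmLoop]
  | cons jx rest ih =>
      intro cand
      obtain ⟨j, x⟩ := jx
      have hsplit : cand.filter (fun p => ((j, x) :: rest).all (fun jx =>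
            decide (p + jx.1 ≥ n) || decide (PySem.List.pyGetD o (p + jx.1) "" = jx.2)))
          = (cand.filter (fun p =>
              decide (p + j ≥ n) || decide (PySem.List.pyGetD o (p + j) "" = x))).filter
              (fun p => rest.all (fun jx =>
                decide (p + jx.1 ≥ n) || decide (PySem.List.pyGetD o (p + jx.1) "" = jx.2))) := by
        rw [List.filter_filter]
        apply List.filter_congr
        intro p _
        simp [List.all_cons, Bool.and_comm]
      by_cases h : cand.filter (fun p =>
          decide (p + j ≥ n) || decide (PySem.List.pyGetD o (p + j) "" = x)) = []
      · simp only [gnmLoop]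
        rw [hsplit, h]
        simp
      · simp only [gnmLoop, if_neg h]
        rw [ih, hsplit]

theorem gnm_mem_enumerate {α : Type} (xs : List α) :
    ∀ (s : Int) (p : Int × α),
      p ∈ PySem.List.enumerate xs s ↔ ∃ (k : Nat) (h : k < xs.length), p = (s + k, xs[k]) := by
  induction xs with
  | nil => intro s p; simp [PySem.List.enumerate_nil]
  | cons x xs ih =>
      intro s p
      rw [PySem.List.enumerate_cons]
      simp only [List.mem_cons, ih]
      constructor
      · rintro (rfl | ⟨k, hk, rfl⟩)
        · exact ⟨0, by simp, by simp⟩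
        · exact ⟨k + 1, by simpa using hk, by simp [Prod.ext_iff]; omega⟩
      · rintro ⟨k, hk, rfl⟩
        cases k with
        | zero => left; simp
        | succ k =>
            right
            refine ⟨k, by simpa using hk, ?_⟩
            simp [Prod.ext_iff]
            omega

-- pointwise bridge: A's slice-equality test at length n-p = B's per-element test at position p
theorem gnm_cond_bridge (o nl : List String) (p : Int)
    (hlo : max 0 ((o.length : Int) - (nl.length : Int)) ≤ p) (hpn : p < (o.length : Int)) :
    decide (PySem.List.slice o (some (-((o.length : Int) - p))) none
        = PySem.List.slice nl none (some ((o.length : Int) - p)))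
      = (PySem.List.enumerate nl).all (fun jx =>
          decide (p + jx.1 ≥ (o.length : Int)) ||
          decide (PySem.List.pyGetD o (p + jx.1) "" = jx.2)) := by
  have h0 : 0 ≤ p := le_trans (le_max_left _ _) hlo
  set n : Int := (o.length : Int) with hn
  set m : Int := (nl.length : Int) with hm
  set k : Nat := (n - p).toNat with hk
  have hk0 : 0 < k := by omega
  have hkm : (k : Int) ≤ m := by omega
  have hkc : (k : Int) = n - p := by omega
  have e1 : PySem.List.slice o (some (-(n - p))) none = o.drop (o.length - k) := by
    rw [← hkc, PySem.List.slice_from_neg_natCast o k hk0]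
  have hjk : o.length - k = p.toNat := by omega
  have e3 : PySem.List.slice nl none (some (n - p)) = nl.take k := by
    rw [← hkc, PySem.List.slice_to nl (by omega)]
    simp
  rw [e1, hjk, e3]
  have hiff : (o.drop p.toNat = nl.take k) ↔
      (∀ t : Nat, t < k → ∀ (ht : p.toNat + t < o.length) (ht2 : t < nl.length),
        o[p.toNat + t] = nl[t]) := by
    constructor
    · intro h t htk ht ht2
      have := congrArg (fun l => l[t]?) h
      simp only [List.getElem?_drop, List.getElem?_take] at this
      rw [if_pos htk] at this
      rw [List.getElem?_eq_getElem ht, List.getElem?_eq_getElem ht2] at this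
      exact Option.some.inj this
    · intro h
      apply List.ext_getElem
      · simp; omega
      · intro t h1 h2
        simp only [List.getElem_drop, List.getElem_take]
        have htk : t < k := by simp at h2; omega
        exact h t htk (by omega) (by simp at h2; omega)
  have hall : ((PySem.List.enumerate nl).all (fun jx =>
      decide (p + jx.1 ≥ n) || decide (PySem.List.pyGetD o (p + jx.1) "" = jx.2)) = true) ↔
      (∀ t : Nat, t < k → ∀ (ht : p.toNat + t < o.length) (ht2 : t < nl.length),
        o[p.toNat + t] = nl[t]) := by
    rw [List.all_eq_true]
    constructor
    · intro h t htk ht ht2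
      have hmem : ((0 : Int) + (t : Int), nl[t]) ∈ PySem.List.enumerate nl :=
        (gnm_mem_enumerate nl 0 _).mpr ⟨t, ht2, rfl⟩
      have := h _ hmem
      simp only [Bool.or_eq_true, decide_eq_true_eq] at this
      rcases this with hge | heq
      · omega
      · rw [← heq]
        rw [PySem.List.pyGetD_eq_getElem o "" (by omega) (by exact_mod_cast (by omega : p + ((0:Int) + (t:Int)) < (o.length:Int)))]
        congr 1
        omega
    · intro h jx hmem
      obtain ⟨t, ht2, rfl⟩ := (gnm_mem_enumerate nl 0 _).mp hmem
      simp only [Bool.or_eq_true, decide_eq_true_eq]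
      by_cases hge : p + ((0 : Int) + (t : Int)) ≥ n
      · exact Or.inl hge
      · right
        have htk : t < k := by omega
        have ht : p.toNat + t < o.length := by omega
        rw [PySem.List.pyGetD_eq_getElem o "" (by omega) (by exact_mod_cast (by omega : p + ((0:Int) + (t:Int)) < (o.length:Int)))]
        have := h t htk ht ht2
        rw [← this]
        congr 1
        omega
  by_cases hP : o.drop p.toNat = nl.take k
  · rw [decide_eq_true hP]
    exact (hall.mpr (hiff.mp hP)).symm
  · rw [decide_eq_false hP]
    cases hb : (PySem.List.enumerate nl).all (fun jx =>
        decide (p + jx.1 ≥ n) || decide (PySem.List.pyGetD o (p + jx.1) "" = jx.2)) with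
    | false => rfl
    | true => exact absurd (hiff.mpr (hall.mp hb)) hP

theorem gnm_core (o nl : List String) (ho : o ≠ []) :
    PySem.List.slice nl
      (some ((PySem.List.pyRange 1 (min (o.length : Int) (nl.length : Int) + 1) 1).foldl
        (fun acc i =>
          if PySem.List.slice o (some (-i)) none = PySem.List.slice nl none (some i)
          then i else acc) 0)) none
    = (match gnmLoop o (o.length : Int) (PySem.List.enumerate nl)
          (PySem.List.pyRange (max 0 ((o.length : Int) - (nl.length : Int))) (o.length : Int) 1) with
       | [] => nl
       | p :: _ => PySem.List.slice nl (some ((o.length : Int) - p)) none) := by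
  have hn1 : 0 < o.length := List.length_pos_iff.mpr ho
  set n : Int := (o.length : Int) with hn
  set m : Int := (nl.length : Int) with hm
  rw [gnm_foldlA_eq, gnmLoop_eq_filter]
  have hrev : (PySem.List.pyRange 1 (min n m + 1) 1).reverse
      = (PySem.List.pyRange (max 0 (n - m)) n 1).map (fun p => n - p) := by
    have heq : PySem.List.pyRange 1 (min n m + 1) 1
        = PySem.List.pyRange (0 + 1) (min n m + 1) 1 := by norm_num
    rw [heq, ← PySem.List.pyRange_neg_one_eq_reverse, PySem.List.pyRange_neg_one,
        PySem.List.pyRange_one, List.map_map]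
    have hlen : (min n m - 0).toNat = (n - max 0 (n - m)).toNat := by omega
    rw [hlen]
    apply List.map_congr_left
    intro k hk
    simp only [Function.comp]
    omega
  rw [hrev, List.find?_map]
  rw [gnm_find?_congr
      ((fun i => decide (PySem.List.slice o (some (-i)) none
          = PySem.List.slice nl none (some i))) ∘ (fun p => n - p))
      (fun p => (PySem.List.enumerate nl).all (fun jx =>
          decide (p + jx.1 ≥ n) || decide (PySem.List.pyGetD o (p + jx.1) "" = jx.2)))
      (PySem.List.pyRange (max 0 (n - m)) n 1)
      (by
        intro p hp
        have hmem := PySem.List.mem_pyRange_one.mp hp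
        simp only [Function.comp_apply]
        exact gnm_cond_bridge o nl p (by omega) (by omega))]
  rw [gnm_find?_eq_head?_filter]
  cases hf : (PySem.List.pyRange (max 0 (n - m)) n 1).filter
      (fun p => (PySem.List.enumerate nl).all (fun jx =>
        decide (p + jx.1 ≥ n) || decide (PySem.List.pyGetD o (p + jx.1) "" = jx.2))) with
  | nil =>
      simp only [List.head?_nil, Option.map_none, Option.getD_none]
      rw [PySem.List.slice_zero_start, PySem.List.slice_none_none]
  | cons p rest => simp

-- ===== VERDICT (by name: the statement is the Claim_ definition above) =====
theorem get_new_messages_spec : Claim_equal_get_new_messages := by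
  intro o nl _ hpre
  unfold Spec_get_new_messages get_new_messages get_new_messages_alt
  by_cases ho : o = []
  · simp [ho]
  · have hnl : nl ≠ [] := by
      rcases hpre with h | h
      · exact absurd h ho
      · exact h
    simp only [if_neg ho]
    by_cases hl : PySem.List.pyGet? o (-1) = PySem.List.pyGet? nl (-1)
    · simp [hl]
    · simp only [if_neg hl]
      exact gnm_core o nl ho
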